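-- pv_equiv track=rewrite | github.com/Cemag-pcp/calimag | rotinas/import_lab_receipts.py | resolve_indexes
-- ===== SOURCE A (Python) =====
-- from typing import Iterable, List, Optional, Sequence
--
-- MANDATORY_ALIASES = {
--     "sequencia": {"sequencia", "seq", "linha"},
--     "codigo": {"codigo", "instrumento", "cod", "instrument"},
--     "data_recebimento": {"datarecebimento", "data", "recebimento"},
-- }
--
-- OPTIONAL_ALIASES = {
--     "link": {"link", "linkcertificado", "certificado", "url"},
--     "laboratorio": {"laboratorio", "lab", "laboratory"},
--     "observacoes": {"observacoes", "obs", "comentario"},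
-- }
--
-- def normalize(value: str) -> str:
--     return "".join(ch for ch in value.lower() if ch.isalnum())
--
-- def resolve_indexes(row: Sequence[str]) -> dict:
--     normalized = [normalize(cell) for cell in row]
--     indexes = {}
--     for key, aliases in {**MANDATORY_ALIASES, **OPTIONAL_ALIASES}.items():
--         idx = next((i for i, name in enumerate(normalized) if name in aliases), None)
--         if idx is not None:
--             indexes[key] = idx
--     return indexes
-- ===== SOURCE B (Python) =====
-- from typing import Sequence
--
-- MANDATORY_ALIASES = {
--     "sequencia": {"sequencia", "seq", "linha"},
--     "codigo": {"codigo", "instrumento", "cod", "instrument"},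
--     "data_recebimento": {"datarecebimento", "data", "recebimento"},
-- }
--
-- OPTIONAL_ALIASES = {
--     "link": {"link", "linkcertificado", "certificado", "url"},
--     "laboratorio": {"laboratorio", "lab", "laboratory"},
--     "observacoes": {"observacoes", "obs", "comentario"},
-- }
--
-- _KEYS = list(MANDATORY_ALIASES) + list(OPTIONAL_ALIASES)
-- # Reverse index: each normalized alias maps to its owning key (alias sets are disjoint).
-- _ALIAS_OWNER = {
--     alias: key
--     for key, aliases in {**MANDATORY_ALIASES, **OPTIONAL_ALIASES}.items()
--     for alias in aliases
-- }
--
-- def normalize(value: str) -> str: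
--     return "".join(ch for ch in value.lower() if ch.isalnum())
--
-- def resolve_indexes(row: Sequence[str]) -> dict:
--     found = {}
--     for i, cell in enumerate(row):
--         key = _ALIAS_OWNER.get(normalize(cell))
--         if key is not None and key not in found:
--             found[key] = i
--     return {key: found[key] for key in _KEYS if key in found}
-- ===== Notes on version B (the rewrite author's own statement) =====
-- stated objective: alternative
-- what changed: Replaces the six independent next()/scans over the row (one per key) with a reverse alias-to-key index built once and a single left-to-right pass over the row that records each key's first matching column, valid because the alias sets are pairwise disjoint.
import Mathlib
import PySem

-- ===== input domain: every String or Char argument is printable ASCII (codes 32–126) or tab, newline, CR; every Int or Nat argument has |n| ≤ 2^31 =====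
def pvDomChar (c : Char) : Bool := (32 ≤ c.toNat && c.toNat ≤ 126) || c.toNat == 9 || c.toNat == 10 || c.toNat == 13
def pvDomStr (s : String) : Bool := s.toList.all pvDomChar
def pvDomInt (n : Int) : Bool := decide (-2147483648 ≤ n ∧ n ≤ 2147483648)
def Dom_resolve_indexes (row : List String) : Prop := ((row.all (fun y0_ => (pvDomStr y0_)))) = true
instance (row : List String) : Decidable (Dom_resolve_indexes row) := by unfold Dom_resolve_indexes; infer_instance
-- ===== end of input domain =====

-- B replaces the six independent next()/scans of the row with ONE left-to-right pass over the
-- row using a reverse alias→key index (the alias sets are pairwise disjoint), keeping the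
-- first-matching-column tie-break; objective: alternative decomposition.

-- ===== PORT A =====
-- normalize: "".join(ch for ch in value.lower() if ch.isalnum())
def pvNormalize (s : String) : String :=
  String.mk ((PySem.Str.lower s).toList.filter PySem.Chars.isalnum)

-- {**MANDATORY_ALIASES, **OPTIONAL_ALIASES} in its Python insertion order; each alias set as a list of its distinct elements
def pvAliases : List (String × List String) :=
  [("sequencia", ["sequencia", "seq", "linha"]),
   ("codigo", ["codigo", "instrumento", "cod", "instrument"]),
   ("data_recebimento", ["datarecebimento", "data", "recebimento"]),
   ("link", ["link", "linkcertificado", "certificado", "url"]),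
   ("laboratorio", ["laboratorio", "lab", "laboratory"]),
   ("observacoes", ["observacoes", "obs", "comentario"])]

def resolve_indexes (row : List String) : List (String × Int) :=
  let normalized := row.map pvNormalize
  pvAliases.foldl
    (fun indexes ka =>
      match (PySem.List.enumerate normalized).find? (fun p => ka.2.contains p.2) with
      | some p => indexes ++ [(ka.1, p.1)]
      | none => indexes)
    []

-- ===== PORT B =====
def pvKeys : List String :=
  ["sequencia", "codigo", "data_recebimento", "link", "laboratorio", "observacoes"]

-- _ALIAS_OWNER = {alias: key for key, aliases in {**M, **O}.items() for alias in aliases}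
def pvOwner : PySem.Dict String String :=
  PySem.Dict.ofList (pvAliases.flatMap (fun ka => ka.2.map (fun a => (a, ka.1))))

-- the body of B's single for-loop over enumerate(row)
def pvStep (found : PySem.Dict String Int) (p : Int × String) : PySem.Dict String Int :=
  match pvOwner.get? (pvNormalize p.2) with
  | some key => if found.contains key then found else found.insert key p.1
  | none => found

def pvFound (row : List String) : PySem.Dict String Int :=
  (PySem.List.enumerate row).foldl pvStep PySem.Dict.empty

def resolve_indexes_alt (row : List String) : List (String × Int) :=
  let found := pvFound row
  pvKeys.foldl
    (fun acc k =>
      match found.get? k with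
      | some v => acc ++ [(k, v)]
      | none => acc)
    []

-- ===== PRECONDITION & SPEC =====
def Spec_resolve_indexes (row : List String) (out : List (String × Int)) : Prop := out = resolve_indexes_alt row
instance (row : List String) (out : List (String × Int)) : Decidable (Spec_resolve_indexes row out) := by unfold Spec_resolve_indexes; infer_instance

-- ===== CLAIM (what is proved, stated in full; the proofs are below) =====
def Claim_equal_resolve_indexes : Prop := ∀ (row : List String), Dom_resolve_indexes row → Spec_resolve_indexes row (resolve_indexes row)

-- ===== LEMMAS AND PROOFS =====

-- the reverse index's keys, as a literal list
theorem owner_keys : pvOwner.keys =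
    ["sequencia", "seq", "linha", "codigo", "instrumento", "cod", "instrument",
     "datarecebimento", "data", "recebimento", "link", "linkcertificado", "certificado", "url",
     "laboratorio", "lab", "laboratory", "observacoes", "obs", "comentario"] := by decide

-- the reverse index returns key k exactly on k's aliases (the alias sets are disjoint)
theorem owner_char (k : String) (al : List String) (hmem : (k, al) ∈ pvAliases) :
    ∀ s : String, pvOwner.get? s = some k ↔ al.contains s = true := by
  intro s
  constructor
  · intro h
    have hc' : pvOwner.contains s = true := by
      rw [PySem.Dict.contains_eq_isSome_get?, h]; rfl
    have hs : s ∈ pvOwner.keys := (PySem.Dict.contains_iff_mem_keys _ _).mp hc'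
    rw [owner_keys] at hs
    simp only [List.mem_cons, List.not_mem_nil, or_false] at hs
    fin_cases hmem <;>
      (rcases hs with rfl|rfl|rfl|rfl|rfl|rfl|rfl|rfl|rfl|rfl|rfl|rfl|rfl|rfl|rfl|rfl|rfl|rfl|rfl|rfl <;>
        revert h <;> decide)
  · intro h
    fin_cases hmem <;>
      simp only [List.contains_cons, List.contains_nil, Bool.or_false, Bool.or_eq_true,
        beq_iff_eq] at h <;>
      (first
        | (rcases h with rfl|rfl|rfl)
        | (rcases h with rfl|rfl|rfl|rfl)) <;>
      decide

-- B's loop computes, per key, the first index of a column whose normalization is one of its aliases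
theorem loop_get (k : String) (al : List String) (hk : ∀ s : String, pvOwner.get? s = some k ↔ al.contains s = true) :
    ∀ (l : List (Int × String)) (d : PySem.Dict String Int),
      (l.foldl pvStep d).get? k =
        (d.get? k).or ((l.find? (fun p => al.contains (pvNormalize p.2))).map (·.1)) := by
  intro l
  induction l with
  | nil => intro d; simp
  | cons p l ih =>
    intro d
    rw [List.foldl_cons, ih (pvStep d p)]
    by_cases hc : al.contains (pvNormalize p.2) = true
    · have ho : pvOwner.get? (pvNormalize p.2) = some k := (hk _).mpr hc
      rw [List.find?_cons_of_pos (p := fun (p : Int × String) => al.contains (pvNormalize p.2)) hc]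
      by_cases hd : d.contains k = true
      · have hsome : (d.get? k).isSome := by
          rw [← PySem.Dict.contains_eq_isSome_get?]; exact hd
        obtain ⟨v, hv⟩ := Option.isSome_iff_exists.mp hsome
        simp [pvStep, ho, hd, hv]
      · have hnone : d.get? k = none := by
          rw [PySem.Dict.get?_eq_none_iff_contains]; simpa using hd
        simp [pvStep, ho, hd, hnone, PySem.Dict.get?_insert_self]
    · rw [List.find?_cons_of_neg (p := fun (p : Int × String) => al.contains (pvNormalize p.2)) hc]
      have hstep : (pvStep d p).get? k = d.get? k := by
        unfold pvStep
        cases ho : pvOwner.get? (pvNormalize p.2) with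
        | none => rfl
        | some k' =>
          have hne : k ≠ k' := by
            intro h; subst h; exact hc ((hk _).mp ho)
          by_cases hd : d.contains k' = true
          · simp [hd]
          · simp [hd, PySem.Dict.get?_insert_of_ne _ _ hne]
      rw [hstep]

-- finding on enumerate(map f row) is finding on enumerate(row) with f applied inside the predicate
theorem find_enum_map (f : String → String) (q : String → Bool) :
    ∀ (l : List String) (s : Int),
      ((PySem.List.enumerate (l.map f) s).find? (fun p => q p.2)).map (·.1)
        = ((PySem.List.enumerate l s).find? (fun p => q (f p.2))).map (·.1) := by
  intro l
  induction l with
  | nil => intro s; simp [PySem.List.enumerate_nil]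
  | cons a l ih =>
    intro s
    simp only [List.map_cons, PySem.List.enumerate_cons]
    by_cases h : q (f a) = true
    · rw [List.find?_cons_of_pos (p := fun (p : Int × String) => q p.2) h,
          List.find?_cons_of_pos (p := fun (p : Int × String) => q (f p.2)) h]
      rfl
    · rw [List.find?_cons_of_neg (p := fun (p : Int × String) => q p.2) h,
          List.find?_cons_of_neg (p := fun (p : Int × String) => q (f p.2)) h]
      exact ih (s + 1)

-- per key: B's dict lookup equals A's next(...) scan result
theorem found_get (row : List String) (k : String) (al : List String) (hmem : (k, al) ∈ pvAliases) :
    (pvFound row).get? k =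
      ((PySem.List.enumerate (row.map pvNormalize)).find? (fun p => al.contains p.2)).map (·.1) := by
  rw [pvFound, loop_get k al (owner_char k al hmem), PySem.Dict.get?_empty, Option.none_or]
  exact (find_enum_map pvNormalize (fun s => al.contains s) row 0).symm

theorem match_map (o : Option (Int × String)) (acc : List (String × Int)) (k : String) :
    (match o with | some p => acc ++ [(k, p.1)] | none => acc)
      = (match o.map (·.1) with | some v => acc ++ [(k, v)] | none => acc) := by
  cases o <;> rfl

-- ===== VERDICT (by name: the statement is the Claim_ definition above) =====
theorem resolve_indexes_spec : Claim_equal_resolve_indexes := by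
  intro row _
  show resolve_indexes row = resolve_indexes_alt row
  have h1 := found_get row "sequencia" ["sequencia", "seq", "linha"] (by simp [pvAliases])
  have h2 := found_get row "codigo" ["codigo", "instrumento", "cod", "instrument"] (by simp [pvAliases])
  have h3 := found_get row "data_recebimento" ["datarecebimento", "data", "recebimento"] (by simp [pvAliases])
  have h4 := found_get row "link" ["link", "linkcertificado", "certificado", "url"] (by simp [pvAliases])
  have h5 := found_get row "laboratorio" ["laboratorio", "lab", "laboratory"] (by simp [pvAliases])
  have h6 := found_get row "observacoes" ["observacoes", "obs", "comentario"] (by simp [pvAliases])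
  simp only [resolve_indexes, resolve_indexes_alt, pvAliases, pvKeys, List.foldl_cons,
    List.foldl_nil, h1, h2, h3, h4, h5, h6, match_map]
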